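-- pv_equiv track=rewrite | github.com/danitrave/DNA_project | DNA_Project/dna.py | firstSSR
-- ===== SOURCE A (Python) =====
-- def firstSSR(dna, seq):
--
--     if dna == "" or seq == "":
--         return None
--
--     dna = dna.upper()
--     seq = seq.upper()
--     count = 0
--
--     if dna.find(seq) == -1:
--         return 0
--
--     else:
--         x = dna.find(seq)
--         while dna[x:x+len(seq)] == seq:   #goes on as long as consiquent nucleotides are the same as the sequence
--             count += 1
--             x += len(seq)
--         return count
--
--     """Returns the length (number of repeats) of the first SSR in dna
--     that repeats the sequence seq
--     Parameters:
--         dna: a string object representing a DNA sequence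
--         seq: a string object representing a short sequence of DNA
--     Return value:
--         (if seq found): the integer number of seq repeats in the first SSR
--         (if seq not found): 0
--     Example: firstssr("aggcctggcggcggc", "ggc") = 1
--     """
-- ===== SOURCE B (Python) =====
-- def firstSSR(dna, seq):
--     if dna == "" or seq == "":
--         return None
--     dna = dna.upper()
--     seq = seq.upper()
--     x = dna.find(seq)
--     if x == -1:
--         return 0
--     tail = dna[x:]
--     p = 0
--     while p < len(tail) and tail[p] == seq[p % len(seq)]:
--         p += 1
--     return p // len(seq)
-- ===== Notes on version B (the rewrite author's own statement) =====
-- stated objective: alternative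
-- what changed: B replaces A's chunk-stepping while loop (repeatedly re-slicing dna and comparing a whole copy of seq per step) by a single character-level scan of the suffix at the first occurrence against seq read cyclically, followed by one floor division by len(seq).
import Mathlib
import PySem

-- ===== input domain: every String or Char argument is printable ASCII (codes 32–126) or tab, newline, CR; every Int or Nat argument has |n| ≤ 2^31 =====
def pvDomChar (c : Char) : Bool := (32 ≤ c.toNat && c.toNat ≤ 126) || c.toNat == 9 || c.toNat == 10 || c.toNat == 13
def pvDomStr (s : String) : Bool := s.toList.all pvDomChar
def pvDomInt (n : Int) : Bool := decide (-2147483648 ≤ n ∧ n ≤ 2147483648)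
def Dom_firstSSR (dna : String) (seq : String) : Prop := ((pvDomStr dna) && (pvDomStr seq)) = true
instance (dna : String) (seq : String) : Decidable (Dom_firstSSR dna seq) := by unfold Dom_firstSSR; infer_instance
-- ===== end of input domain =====

-- B scans the suffix at the first occurrence character by character against seq read cyclically
-- and floor-divides once, instead of A's chunk-stepping slice-comparison loop; same cost, alternative structure.

-- ===== PORT A =====
-- A's while loop: x advances by len(seq) while dna[x:x+len(seq)] == seq.  Each iteration needs
-- x < dnaL.length (seq is nonempty when the loop runs), so dnaL.length + 1 units of fuel are
-- never exhausted before the condition fails: the fuel recursion computes exactly A's loop.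
def firstSSR_loopA (dnaL seqL : List Char) : Nat → Nat → Int → Int
  | 0, _, count => count
  | fuel+1, x, count =>
    if PySem.List.slice dnaL (some (x : Int)) (some ((x : Int) + (seqL.length : Int))) = seqL
    then firstSSR_loopA dnaL seqL fuel (x + seqL.length) (count + 1)
    else count

def firstSSR (dna : String) (seq : String) : Option Int :=
  if dna.toList = [] ∨ seq.toList = [] then none
  else
    let dnaL := PySem.Chars.upper dna.toList
    let seqL := PySem.Chars.upper seq.toList
    if PySem.Chars.find dnaL seqL = -1 then some 0
    else
      -- here find ≠ -1, so find ≥ 0 and toNat is exact (no clamping)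
      let x := (PySem.Chars.find dnaL seqL).toNat
      some (firstSSR_loopA dnaL seqL (dnaL.length + 1) x 0)

-- ===== PORT B =====
-- B's while loop: p advances by 1 while p < len(tail) and tail[p] == seq[p % len(seq)].
-- Both indexings are in range when the condition holds, so getElem? equality is exact.
def firstSSR_loopB (tail seqL : List Char) (p : Nat) : Nat :=
  if p < tail.length ∧ tail[p]? = seqL[p % seqL.length]? then firstSSR_loopB tail seqL (p + 1) else p
termination_by tail.length - p
decreasing_by omega

def firstSSR_alt (dna : String) (seq : String) : Option Int :=
  if dna.toList = [] ∨ seq.toList = [] then none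
  else
    let dnaL := PySem.Chars.upper dna.toList
    let seqL := PySem.Chars.upper seq.toList
    let x := PySem.Chars.find dnaL seqL
    if x = -1 then some 0
    else
      let tail := PySem.List.slice dnaL (some x) none
      some (((firstSSR_loopB tail seqL 0) / seqL.length : Nat) : Int)

-- ===== PRECONDITION & SPEC =====
def Spec_firstSSR (dna : String) (seq : String) (out : Option Int) : Prop := out = firstSSR_alt dna seq
instance (dna : String) (seq : String) (out : Option Int) : Decidable (Spec_firstSSR dna seq out) := by unfold Spec_firstSSR; infer_instance

-- ===== CLAIM (what is proved, stated in full; the proofs are below) =====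
def Claim_equal_firstSSR : Prop := ∀ (dna : String) (seq : String), Dom_firstSSR dna seq → Spec_firstSSR dna seq (firstSSR dna seq)

-- ===== LEMMAS AND PROOFS =====

-- cp s t i = number of leading characters of t matching s read cyclically starting at offset i
def firstSSR_cp (s : List Char) : List Char → Nat → Nat
  | [], _ => 0
  | c :: t, i => if (some c : Option Char) = s[i % s.length]? then 1 + firstSSR_cp s t (i + 1) else 0

-- cc s fuel t = number of leading whole copies of s in t (A's chunk count)
def firstSSR_cc (s : List Char) : Nat → List Char → Int
  | 0, _ => 0
  | fuel+1, t => if t.take s.length = s then 1 + firstSSR_cc s fuel (t.drop s.length) else 0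

theorem firstSSR_loopB_eq_cp (t s : List Char) (p : Nat) :
    firstSSR_loopB t s p = p + firstSSR_cp s (t.drop p) p := by
  by_cases h : p < t.length ∧ t[p]? = s[p % s.length]?
  · obtain ⟨hp, hc⟩ := h
    rw [firstSSR_loopB, if_pos ⟨hp, hc⟩, firstSSR_loopB_eq_cp t s (p+1)]
    rw [List.drop_eq_getElem_cons hp, firstSSR_cp]
    have : (some t[p] : Option Char) = s[p % s.length]? := by
      rw [← List.getElem?_eq_getElem hp]; exact hc
    rw [if_pos this]; omega
  · rw [firstSSR_loopB, if_neg h]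
    by_cases hp : p < t.length
    · have hc : ¬ t[p]? = s[p % s.length]? := fun hc => h ⟨hp, hc⟩
      rw [List.drop_eq_getElem_cons hp, firstSSR_cp]
      have : ¬ (some t[p] : Option Char) = s[p % s.length]? := by
        rw [← List.getElem?_eq_getElem hp]; exact hc
      rw [if_neg this]; omega
    · rw [List.drop_eq_nil_of_le (by omega), firstSSR_cp]; omega
termination_by t.length - p
decreasing_by omega

theorem firstSSR_loopA_eq_cc (dnaL s : List Char) (fuel x : Nat) (count : Int) :
    firstSSR_loopA dnaL s fuel x count = count + firstSSR_cc s fuel (dnaL.drop x) := by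
  induction fuel generalizing x count with
  | zero => simp [firstSSR_loopA, firstSSR_cc]
  | succ f ih =>
    rw [firstSSR_loopA, firstSSR_cc, PySem.List.slice_natCast_add]
    by_cases h : (dnaL.drop x).take s.length = s
    · rw [if_pos h, if_pos h, ih]
      rw [show dnaL.drop (x + s.length) = (dnaL.drop x).drop s.length by
        rw [List.drop_drop]]
      ring
    · rw [if_neg h, if_neg h]; ring

theorem firstSSR_cp_le (s t : List Char) (i : Nat) : firstSSR_cp s t i ≤ t.length := by
  induction t generalizing i with
  | nil => simp [firstSSR_cp]
  | cons c t ih =>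
    rw [firstSSR_cp]
    split_ifs
    · have := ih (i + 1); simp; omega
    · simp

theorem firstSSR_cp_add_period (s : List Char) (t : List Char) (i : Nat) :
    firstSSR_cp s t (i + s.length) = firstSSR_cp s t i := by
  induction t generalizing i with
  | nil => simp [firstSSR_cp]
  | cons c t ih =>
    rw [firstSSR_cp, firstSSR_cp, Nat.add_mod_right]
    rw [show i + s.length + 1 = (i + 1) + s.length by ring, ih]

theorem firstSSR_cp_append (s : List Char) (u t : List Char) (i : Nat)
    (hu : ∀ j, j < u.length → u[j]? = s[(i + j) % s.length]?) :
    firstSSR_cp s (u ++ t) i = u.length + firstSSR_cp s t (i + u.length) := by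
  induction u generalizing i with
  | nil => simp
  | cons c u ih =>
    rw [List.cons_append, firstSSR_cp]
    have h0 : (some c : Option Char) = s[i % s.length]? := by
      have := hu 0 (by simp); simpa using this
    rw [if_pos h0, ih (i + 1) (fun j hj => by
      have := hu (j + 1) (by simpa using Nat.succ_lt_succ hj)
      rw [show i + 1 + j = i + (j + 1) by ring]; simpa using this)]
    simp only [List.length_cons]
    rw [show i + (u.length + 1) = i + 1 + u.length by ring]
    omega

theorem firstSSR_cp_getElem (s : List Char) (t : List Char) (i n : Nat)
    (hn : n ≤ firstSSR_cp s t i) : ∀ j, j < n → t[j]? = s[(i + j) % s.length]? := by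
  induction t generalizing i n with
  | nil => simp [firstSSR_cp] at hn; omega
  | cons c t ih =>
    rw [firstSSR_cp] at hn
    split_ifs at hn with hc
    · intro j hj
      cases j with
      | zero => simpa using hc
      | succ j =>
        have := ih (i + 1) (n - 1) (by omega) j (by omega)
        simp only [List.getElem?_cons_succ]
        rw [show i + (j + 1) = i + 1 + j by ring]
        exact this
    · omega

-- if a whole period matches, the first s.length characters of t are exactly s
theorem firstSSR_take_eq_of_cp_ge (s t : List Char)
    (h : s.length ≤ firstSSR_cp s t 0) : t.take s.length = s := by
  have hlen : s.length ≤ t.length := le_trans h (firstSSR_cp_le s t 0)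
  apply List.ext_getElem?
  intro j
  by_cases hj : j < s.length
  · rw [List.getElem?_take_of_lt hj]
    have := firstSSR_cp_getElem s t 0 s.length h j hj
    simpa [Nat.mod_eq_of_lt hj] using this
  · rw [List.getElem?_eq_none (by simp; omega), List.getElem?_eq_none (by omega)]

theorem firstSSR_cp_div_eq_cc (s : List Char) (hs : s ≠ []) (fuel : Nat) (t : List Char)
    (hfuel : t.length < fuel) :
    ((firstSSR_cp s t 0 / s.length : Nat) : Int) = firstSSR_cc s fuel t := by
  have hL : 0 < s.length := List.length_pos_iff.mpr hs
  induction fuel generalizing t with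
  | zero => omega
  | succ f ih =>
    rw [firstSSR_cc]
    by_cases h : t.take s.length = s
    · rw [if_pos h]
      have hlen : s.length ≤ t.length := by
        have := congrArg List.length h
        simp at this; omega
      have hsplit : t = s ++ t.drop s.length := by
        conv_lhs => rw [← List.take_append_drop s.length t, h]
      have hcp : firstSSR_cp s t 0 = s.length + firstSSR_cp s (t.drop s.length) 0 := by
        conv_lhs => rw [hsplit]
        rw [firstSSR_cp_append s s (t.drop s.length) 0
          (fun j hj => by rw [Nat.zero_add, Nat.mod_eq_of_lt hj])]
        rw [show (0 : Nat) + s.length = 0 + s.length from rfl,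
          firstSSR_cp_add_period s (t.drop s.length) 0]
      rw [hcp, Nat.add_comm s.length, Nat.add_div_right _ hL]
      rw [← ih (t.drop s.length) (by simp; omega)]
      push_cast; ring
    · rw [if_neg h]
      have hlt : firstSSR_cp s t 0 < s.length := by
        by_contra hge
        exact h (firstSSR_take_eq_of_cp_ge s t (by omega))
      rw [Nat.div_eq_of_lt hlt]; simp

-- ===== VERDICT (by name: the statement is the Claim_ definition above) =====
theorem firstSSR_spec : Claim_equal_firstSSR := by
  unfold Claim_equal_firstSSR Spec_firstSSR firstSSR firstSSR_alt
  intro dna seq _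
  by_cases hempty : dna.toList = [] ∨ seq.toList = []
  · rw [if_pos hempty, if_pos hempty]
  · rw [if_neg hempty, if_neg hempty]
    push_neg at hempty
    set dnaL := PySem.Chars.upper dna.toList with hdnaL
    set seqL := PySem.Chars.upper seq.toList with hseqL
    have hs : seqL ≠ [] := by
      simpa [hseqL, PySem.Chars.upper] using hempty.2
    by_cases hfind : PySem.Chars.find dnaL seqL = -1
    · rw [if_pos hfind, if_pos hfind]
    · rw [if_neg hfind, if_neg hfind]
      have hpos : 0 ≤ PySem.Chars.find dnaL seqL :=
        (PySem.Chars.find_nonneg_iff dnaL seqL).mpr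
          ((PySem.Chars.find_ne_neg_one_iff dnaL seqL).mp hfind)
      rw [PySem.List.slice_from dnaL hpos]
      show (some (firstSSR_loopA dnaL seqL (dnaL.length + 1)
          (PySem.Chars.find dnaL seqL).toNat 0) : Option Int)
        = some (((firstSSR_loopB (dnaL.drop (PySem.Chars.find dnaL seqL).toNat) seqL 0)
            / seqL.length : Nat) : Int)
      rw [firstSSR_loopA_eq_cc, firstSSR_loopB_eq_cp, List.drop_zero, Int.zero_add,
        Nat.zero_add]
      rw [firstSSR_cp_div_eq_cc seqL hs (dnaL.length + 1)
        (dnaL.drop (PySem.Chars.find dnaL seqL).toNat) (by simp)]
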